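-- pv_equiv track=rewrite | github.com/RjNayak/codility | fasta-sequence-toolkit.py | orf_postion_finder
-- ===== SOURCE A (Python) =====
-- def orf_postion_finder(dna_seq):
--     start_codon = "ATG"
--     stop_codons = ["TAA", "TAG", "TGA"]
--
--     pos_dict = {}
--
--     for i in range(3):
--         pos = []
--
--         if i == 0:
--             frame = [dna_seq[j:j+3] for j in range(i, len(dna_seq), 3)]
--         else:
--             frame = [dna_seq[:i]] + [dna_seq[j:j+3]
--                                      for j in range(i, len(dna_seq), 3)]
--
--         start_pos = []
--         stop_pos = []
--         try:
--             index_start_pos = [m for m, y in enumerate(frame) if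
--                                y == start_codon]
--             start_pos += index_start_pos
--         except ValueError:
--             pos.append((-1, 0))
--             continue
--
--         for stop_codon in stop_codons:
--             try:
--
--                 index_stop_codon = [n for n, x in enumerate(frame) if
--                                     x == stop_codon and n > min(start_pos)]
--                 stop_pos += index_stop_codon
--             except ValueError:
--                 continue
--         if len(stop_pos) == 0:
--             pos.append((-1, 0))
--         else:
--
--             while len(start_pos) != 0:
--                 start = min(start_pos)
--                 try:
--                     end = min([stop for stop in stop_pos if stop > start])
--                 except ValueError:
--                     break
--
--                 s_pos = len("".join(frame[:start])) + 1
--                 pos.append((s_pos, (end - start + 1)*3))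
--                 start_pos.remove(start)
--         pos_dict["frame%d" % (i+1)] = pos
--
--     return pos_dict
-- ===== SOURCE B (Python) =====
-- def orf_postion_finder(dna_seq):
--     stop_set = ("TAA", "TAG", "TGA")
--     pos_dict = {}
--     for f in range(3):
--         starts = []
--         stops = []
--         for p in range(f, len(dna_seq), 3):
--             codon = dna_seq[p:p+3]
--             if codon == "ATG":
--                 starts.append(p)
--             elif codon in stop_set:
--                 stops.append(p)
--         pairs = []
--         j = 0
--         for p in starts:
--             while j < len(stops) and stops[j] <= p:
--                 j += 1
--             if j == len(stops):
--                 break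
--             pairs.append((p + 1, stops[j] - p + 3))
--         if not pairs:
--             pairs = [(-1, 0)]
--         pos_dict["frame%d" % (f + 1)] = pairs
--     return pos_dict
-- ===== Notes on version B (the rewrite author's own statement) =====
-- stated objective: faster
-- what changed: B replaces A's chunked-frame lists, repeated min() scans, list.remove and the O(n^2) ''.join length recomputation per start with one linear scan per reading frame that records start/stop character positions directly, then pairs each start with its nearest following stop by a single forward-moving two-pointer sweep.
import Mathlib
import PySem

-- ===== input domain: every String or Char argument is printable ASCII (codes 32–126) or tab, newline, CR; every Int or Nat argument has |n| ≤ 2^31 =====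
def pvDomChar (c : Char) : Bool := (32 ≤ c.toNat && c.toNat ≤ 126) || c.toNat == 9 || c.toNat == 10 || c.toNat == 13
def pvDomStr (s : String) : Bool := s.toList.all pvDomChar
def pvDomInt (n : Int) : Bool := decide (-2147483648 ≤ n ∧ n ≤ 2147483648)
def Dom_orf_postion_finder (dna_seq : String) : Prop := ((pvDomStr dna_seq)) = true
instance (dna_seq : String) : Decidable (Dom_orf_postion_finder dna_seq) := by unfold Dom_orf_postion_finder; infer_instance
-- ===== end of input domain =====

-- B: one linear scan per reading frame + a two-pointer pairing sweep instead of A's chunk lists,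
-- repeated min() scans and per-start join; objective: faster (asymptotic).


-- ===== PORT A =====
def pvATG : List Char := ['A', 'T', 'G']
def pvStopCodons : List (List Char) := [['T', 'A', 'A'], ['T', 'A', 'G'], ['T', 'G', 'A']]

-- termination helper for the while-loop port (cited by pvWhileA's decreasing_by)
theorem pvRemove_lt {α : Type} [BEq α] [LawfulBEq α] (xs : List α) (v : α) (l' : List α)
    (h : PySem.List.remove? xs v = some l') : l'.length < xs.length := by
  unfold PySem.List.remove? at h
  cases hidx : List.idxOf? v xs with
  | none => rw [hidx] at h; simp at h
  | some k =>
    rw [hidx] at h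
    simp only [Option.map_some, Option.some.injEq] at h
    have hidx' : PySem.List.index? xs v = some k := by
      rw [PySem.List.index?_eq_idxOf?]; exact hidx
    obtain ⟨hk, -, -⟩ := PySem.List.getElem_of_index?_eq_some hidx'
    subst h
    rw [List.length_eraseIdx_of_lt hk]
    omega

-- [dna_seq[j:j+3] for j in range(i, len(dna_seq), 3)]
def pvChunksA (s : List Char) (i : Int) : List (List Char) :=
  (PySem.List.pyRange i (PySem.List.len s) 3).map
    (fun j => PySem.List.slice s (some j) (some (j + 3)))

-- frame = … (the if/else on i == 0)
def pvFrame (s : List Char) (i : Int) : List (List Char) :=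
  if i == 0 then pvChunksA s i
  else PySem.List.slice s none (some i) :: pvChunksA s i

-- start_pos += [m for m, y in enumerate(frame) if y == start_codon]
-- (the surrounding try/except ValueError is dead code: a list comprehension raises no ValueError)
def pvStartPosA (frame : List (List Char)) : List Int :=
  ((PySem.List.enumerate frame 0).filter (fun q => q.2 == pvATG)).map (fun q => q.1)

-- the stop-codon loop; 'min(start_pos)' on an empty start_pos raises ValueError and the except
-- clause 'continue's leaving stop_pos unchanged — and an empty start_pos contributes nothing in
-- every case — modeled by the 'none' branch of min?
def pvStopPosA (frame : List (List Char)) (start_pos : List Int) : List Int :=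
  pvStopCodons.foldl (fun acc sc =>
    match PySem.List.min? start_pos (fun x => x) with
    | none => acc
    | some mn =>
        acc ++ ((PySem.List.enumerate frame 0).filter
            (fun q => q.2 == sc && decide (mn < q.1))).map (fun q => q.1)) []

-- while len(start_pos) != 0: …
def pvWhileA (frame : List (List Char)) (stop_pos : List Int) :
    List Int → List (Int × Int) → List (Int × Int)
  | [], pos => pos
  | a :: tl, pos =>
    match PySem.List.min? (a :: tl) (fun x => x) with
    | none => pos   -- unreachable: the list is nonempty
    | some start =>
      match PySem.List.min? (stop_pos.filter (fun st => decide (start < st))) (fun x => x) with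
      | none => pos  -- 'break': min([]) raises ValueError, caught
      | some e =>
        let s_pos : Int :=
          PySem.List.len (PySem.Chars.join [] (PySem.List.slice frame none (some start))) + 1
        -- start = min(start_pos) is always a member, so remove? never fails (getD [] unreachable)
        pvWhileA frame stop_pos ((PySem.List.remove? (a :: tl) start).getD [])
          (pos ++ [(s_pos, (e - start + 1) * 3)])
termination_by sp _ => sp.length
decreasing_by
  rcases h : PySem.List.remove? (a :: tl) start with _ | l'
  · simp
  · simp only [Option.getD_some]
    exact pvRemove_lt _ _ _ h

-- one iteration of the outer 'for i in range(3)' loop: the value stored for "frame%d" % (i+1)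
def pvPosA (s : List Char) (i : Int) : List (Int × Int) :=
  let frame := pvFrame s i
  let start_pos := pvStartPosA frame
  let stop_pos := pvStopPosA frame start_pos
  if stop_pos.length == 0 then [(-1, 0)] else pvWhileA frame stop_pos start_pos []

def orf_postion_finder (dna_seq : String) : List (String × List (Int × Int)) :=
  ((PySem.List.pyRange 0 3 1).foldl
    (fun d i => d.insert ("frame" ++ PySem.Int.toStr (i + 1)) (pvPosA dna_seq.toList i))
    PySem.Dict.empty).items

-- ===== PORT B =====
-- one scan over the frame's codon positions, collecting start and stop character positions
def pvScanB (s : List Char) (f : Int) : List Int × List Int :=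
  (PySem.List.pyRange f (PySem.List.len s) 3).foldl (fun st p =>
    if PySem.List.slice s (some p) (some (p + 3)) == pvATG then (st.1 ++ [p], st.2)
    else if pvStopCodons.contains (PySem.List.slice s (some p) (some (p + 3))) then
      (st.1, st.2 ++ [p])
    else (st.1, st.2)) ([], [])

-- while j < len(stops) and stops[j] <= p: j += 1
def pvAdvanceB (stops : List Int) (p : Int) (j : Nat) : Nat :=
  if h : j < stops.length then
    if stops[j] ≤ p then pvAdvanceB stops p (j + 1) else j
  else j
termination_by stops.length - j

-- for p in starts: advance j; if j == len(stops): break; pairs.append(...)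
def pvPairB (stops : List Int) : Nat → List (Int × Int) → List Int → List (Int × Int)
  | _, pairs, [] => pairs
  | j, pairs, p :: rest =>
    let j' := pvAdvanceB stops p j
    if h : j' < stops.length then
      pvPairB stops j' (pairs ++ [(p + 1, stops[j'] - p + 3)]) rest
    else pairs

def pvPosB (s : List Char) (f : Int) : List (Int × Int) :=
  let st := pvScanB s f
  let pairs := pvPairB st.2 0 [] st.1
  if pairs.isEmpty then [(-1, 0)] else pairs

def orf_postion_finder_alt (dna_seq : String) : List (String × List (Int × Int)) :=
  ((PySem.List.pyRange 0 3 1).foldl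
    (fun d f => d.insert ("frame" ++ PySem.Int.toStr (f + 1)) (pvPosB dna_seq.toList f))
    PySem.Dict.empty).items

-- ===== PRECONDITION & SPEC =====
def Spec_orf_postion_finder (dna_seq : String) (out : List (String × List (Int × Int))) : Prop := out = orf_postion_finder_alt dna_seq
instance (dna_seq : String) (out : List (String × List (Int × Int))) : Decidable (Spec_orf_postion_finder dna_seq out) := by unfold Spec_orf_postion_finder; infer_instance

-- ===== CLAIM (what is proved, stated in full; the proofs are below) =====
def Claim_equal_orf_postion_finder : Prop := ∀ (dna_seq : String), Dom_orf_postion_finder dna_seq → Spec_orf_postion_finder dna_seq (orf_postion_finder dna_seq)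

-- ===== LEMMAS AND PROOFS =====

-- proof-side abbreviations
def pvOff (i : Int) : Int := if i == 0 then 0 else 1
def pvP (s : List Char) (i : Int) : List Int := PySem.List.pyRange i (PySem.List.len s) 3
def pvEP (s : List Char) (i : Int) : List (Int × Int) := PySem.List.enumerate (pvP s i) (pvOff i)
def pvL (s : List Char) (i : Int) : List (Int × Int) :=
  (pvEP s i).filter (fun q => PySem.List.slice s (some q.2) (some (q.2 + 3)) == pvATG)
def pvM (s : List Char) (i : Int) : List (Int × Int) :=
  (pvEP s i).filter (fun q => pvStopCodons.contains (PySem.List.slice s (some q.2) (some (q.2 + 3))))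

theorem pv_min_eq (l : List Int) (a : Int) (ha : a ∈ l) (hmin : ∀ x ∈ l, a ≤ x) :
    PySem.List.min? l (fun x => x) = some a := by
  cases hm : PySem.List.min? l (fun x => x) with
  | none =>
    rw [PySem.List.min?_eq_none_iff] at hm
    subst hm; simp at ha
  | some m =>
    have h1 : m ∈ l := PySem.List.min?_mem hm
    have h2 : ∀ y ∈ l, (fun x => x) m ≤ (fun x => x) y := PySem.List.min?_isMin hm
    have : m = a := le_antisymm (h2 a ha) (hmin m h1)
    rw [this]

theorem pv_remove_cons {α : Type} [BEq α] [LawfulBEq α] (a : α) (tl : List α) :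
    PySem.List.remove? (a :: tl) a = some tl := by
  unfold PySem.List.remove?
  rw [← PySem.List.index?_eq_idxOf?, PySem.List.index?_cons_self]
  simp [List.eraseIdx]

theorem pv_enum_map {α β : Type} (f : α → β) (l : List α) (s0 : Int) :
    PySem.List.enumerate (l.map f) s0 = (PySem.List.enumerate l s0).map (fun q => (q.1, f q.2)) := by
  induction l generalizing s0 with
  | nil => simp [PySem.List.enumerate_nil]
  | cons x xs ih => simp [PySem.List.enumerate_cons, ih]

theorem pv_join_nil (parts : List (List Char)) : PySem.Chars.join [] parts = parts.flatten := by
  unfold PySem.Chars.join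
  induction parts with
  | nil => rfl
  | cons x xs ih =>
    cases xs with
    | nil => simp [List.intercalate]
    | cons y t =>
      simp only [List.intercalate, List.intersperse] at ih ⊢
      simp at ih ⊢
      exact ih

theorem pv_adv_spec (st : List Int) (p : Int) :
    ∀ (n j : Nat), st.length - j ≤ n → j ≤ st.length →
      j ≤ pvAdvanceB st p j ∧ pvAdvanceB st p j ≤ st.length ∧
      (∀ k (hk : k < st.length), j ≤ k → k < pvAdvanceB st p j → st[k] ≤ p) ∧
      (∀ hlt : pvAdvanceB st p j < st.length, p < st[pvAdvanceB st p j]) := by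
  intro n
  induction n with
  | zero =>
    intro j h1 h2
    have hj : j = st.length := by omega
    subst hj
    rw [pvAdvanceB, dif_neg (lt_irrefl _)]
    exact ⟨le_refl _, le_refl _, fun k hk h1 h2 => by omega,
      fun h => absurd h (lt_irrefl _)⟩
  | succ n ih =>
    intro j h1 h2
    by_cases hlt : j < st.length
    · rw [pvAdvanceB, dif_pos hlt]
      by_cases hle : st[j] ≤ p
      · rw [if_pos hle]
        obtain ⟨a, b, c, d⟩ := ih (j + 1) (by omega) (by omega)
        refine ⟨by omega, b, ?_, d⟩
        intro k hk hjk hka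
        rcases Nat.eq_or_lt_of_le hjk with h | h
        · subst h; exact hle
        · exact c k hk (by omega) hka
      · rw [if_neg hle]
        exact ⟨le_refl _, by omega, fun k hk h1 h2 => by omega, fun _ => by omega⟩
    · rw [pvAdvanceB, dif_neg hlt]
      exact ⟨le_refl _, by omega, fun k hk h1 h2 => by omega, fun h => absurd h hlt⟩

theorem pv_while_len (frame : List (List Char)) (stopA : List Int) :
    ∀ (n : Nat) (sp : List Int), sp.length ≤ n → ∀ acc,
      acc.length ≤ (pvWhileA frame stopA sp acc).length := by
  intro n
  induction n with
  | zero =>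
    intro sp hsp acc
    have : sp = [] := by
      cases sp with
      | nil => rfl
      | cons a tl => simp at hsp
    subst this
    simp [pvWhileA]
  | succ n ih =>
    intro sp hsp acc
    cases sp with
    | nil => simp [pvWhileA]
    | cons a tl =>
      rw [pvWhileA]
      rcases Option.eq_none_or_eq_some (PySem.List.min? (a :: tl) (fun x => x)) with
        hm1 | ⟨start, hm1⟩
      · rw [PySem.List.min?_eq_none_iff] at hm1
        simp at hm1
      · simp only [hm1]
        rcases Option.eq_none_or_eq_some (PySem.List.min?
            (stopA.filter (fun st => decide (start < st))) (fun x => x)) with hm2 | ⟨e, hm2⟩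
        · simp only [hm2]
          exact le_refl _
        · simp only [hm2]
          have hlen : ((PySem.List.remove? (a :: tl) start).getD []).length ≤ n := by
            rcases hrm : PySem.List.remove? (a :: tl) start with _ | rest
            · simp
            · have := pvRemove_lt _ _ _ hrm
              simp only [Option.getD_some]
              simp at hsp this ⊢
              omega
          exact le_trans (by simp) (ih _ hlen _)

theorem pv_P_eq (s : List Char) (i : Int) :
    pvP s i = (List.range (if i < PySem.List.len s then
        ((PySem.List.len s - i + 3 - 1) / 3).toNat else 0)).map
      (fun t : Nat => i + 3 * (t : Int)) := by
  unfold pvP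
  exact PySem.List.pyRange_of_pos i (PySem.List.len s) (by norm_num)

theorem pv_EP_affine (s : List Char) (i : Int) :
    ∀ q ∈ pvEP s i, q.2 = 3 * q.1 + (i - 3 * pvOff i) := by
  intro q hq
  rw [pvEP, PySem.List.mem_enumerate_iff] at hq
  obtain ⟨k, hk, rfl⟩ := hq
  dsimp only
  rw [List.getElem_of_eq (pv_P_eq s i) hk, List.getElem_map, List.getElem_range]
  ring

theorem pv_EP_pairwise (s : List Char) (i : Int) :
    (pvEP s i).Pairwise (fun a b => a.1 < b.1) :=
  PySem.List.pairwise_lt_enumerate _ _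

-- the prefix chunk dna_seq[:i] (i = 1 or 2) has length ≤ 2, so it is never a codon
theorem pv_pre_short (s : List Char) (i : Int) (h0 : 0 ≤ i) (h2 : i ≤ 2) :
    (PySem.List.slice s none (some i)).length ≤ 2 := by
  rw [PySem.List.slice_to s h0]
  simp only [List.length_take]
  omega

theorem pv_enum_filter_chunks (s : List Char) (i off : Int) (pred : Int → List Char → Bool) :
    ((PySem.List.enumerate ((pvP s i).map (fun j => PySem.List.slice s (some j) (some (j + 3)))) off).filter
        (fun q => pred q.1 q.2)).map (fun q => q.1)
      = ((PySem.List.enumerate (pvP s i) off).filter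
          (fun q => pred q.1 (PySem.List.slice s (some q.2) (some (q.2 + 3))))).map (fun q => q.1) := by
  rw [pv_enum_map, List.filter_map, List.map_map]
  rfl

theorem pv_enum_filter (s : List Char) (i : Int) (hi : i = 0 ∨ i = 1 ∨ i = 2)
    (pred : Int → List Char → Bool)
    (hpre : ∀ z : List Char, z.length ≤ 2 → ∀ idx, pred idx z = false) :
    ((PySem.List.enumerate (pvFrame s i) 0).filter (fun q => pred q.1 q.2)).map (fun q => q.1)
      = ((pvEP s i).filter
          (fun q => pred q.1 (PySem.List.slice s (some q.2) (some (q.2 + 3))))).map (fun q => q.1) := by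
  rcases hi with rfl | rfl | rfl
  · rw [show pvFrame s 0 = pvChunksA s 0 from rfl]
    unfold pvChunksA pvEP pvOff
    exact pv_enum_filter_chunks s 0 0 pred
  · rw [show pvFrame s 1 = PySem.List.slice s none (some 1) :: pvChunksA s 1 from rfl]
    rw [PySem.List.enumerate_cons]
    rw [List.filter_cons]
    have hp : pred 0 (PySem.List.slice s none (some 1)) = false :=
      hpre _ (pv_pre_short s 1 (by norm_num) (by norm_num)) 0
    simp only [hp, Bool.false_eq_true, if_false]
    unfold pvChunksA pvEP pvOff
    norm_num
    exact pv_enum_filter_chunks s 1 1 pred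
  · rw [show pvFrame s 2 = PySem.List.slice s none (some 2) :: pvChunksA s 2 from rfl]
    rw [PySem.List.enumerate_cons]
    rw [List.filter_cons]
    have hp : pred 0 (PySem.List.slice s none (some 2)) = false :=
      hpre _ (pv_pre_short s 2 (by norm_num) (by norm_num)) 0
    simp only [hp, Bool.false_eq_true, if_false]
    unfold pvChunksA pvEP pvOff
    norm_num
    exact pv_enum_filter_chunks s 2 1 pred

theorem pv_start_eq (s : List Char) (i : Int) (hi : i = 0 ∨ i = 1 ∨ i = 2) :
    pvStartPosA (pvFrame s i) = (pvL s i).map (fun q => q.1) := by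
  unfold pvStartPosA pvL
  exact pv_enum_filter s i hi (fun _ z => z == pvATG)
    (fun z hz _ => by
      apply beq_eq_false_iff_ne.mpr
      intro h
      rw [h] at hz
      simp [pvATG] at hz)

theorem pv_scan_aux (s : List Char) (ps : List Int) (a b : List Int) :
    ps.foldl (fun st p =>
      if PySem.List.slice s (some p) (some (p + 3)) == pvATG then (st.1 ++ [p], st.2)
      else if pvStopCodons.contains (PySem.List.slice s (some p) (some (p + 3))) then
        (st.1, st.2 ++ [p])
      else (st.1, st.2)) (a, b)
    = (a ++ ps.filter (fun p => PySem.List.slice s (some p) (some (p + 3)) == pvATG),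
       b ++ ps.filter (fun p => pvStopCodons.contains (PySem.List.slice s (some p) (some (p + 3))))) := by
  induction ps generalizing a b with
  | nil => simp
  | cons p ps ih =>
    rw [List.foldl_cons, List.filter_cons, List.filter_cons]
    cases h1 : (PySem.List.slice s (some p) (some (p + 3)) == pvATG) with
    | true =>
      have hc : pvStopCodons.contains (PySem.List.slice s (some p) (some (p + 3))) = false := by
        rw [beq_iff_eq] at h1; rw [h1]; decide
      rw [hc]
      rw [if_pos rfl, if_pos rfl, if_neg (by simp), ih]
      simp only [List.append_assoc, List.singleton_append]
    | false =>
      cases h2 : pvStopCodons.contains (PySem.List.slice s (some p) (some (p + 3))) with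
      | false =>
        rw [if_neg (by simp), if_neg (by simp), if_neg (by simp), if_neg (by simp), ih]
      | true =>
        rw [if_neg (by simp), if_pos rfl, if_neg (by simp), if_pos rfl, ih]
        simp only [List.append_assoc, List.singleton_append]

theorem pv_filter_snd (ps : List Int) (off : Int) (pred : Int → Bool) :
    ((PySem.List.enumerate ps off).filter (fun q => pred q.2)).map (fun q => q.2)
      = ps.filter pred := by
  conv_rhs => rw [← PySem.List.map_snd_enumerate ps off]
  rw [List.filter_map]
  rfl

theorem pv_scan_eq (s : List Char) (i : Int) :
    pvScanB s i = ((pvL s i).map (fun q => q.2), (pvM s i).map (fun q => q.2)) := by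
  unfold pvScanB
  rw [show (PySem.List.pyRange i (PySem.List.len s) 3) = pvP s i from rfl]
  rw [pv_scan_aux s (pvP s i) [] []]
  unfold pvL pvM pvEP
  rw [← pv_filter_snd (pvP s i) (pvOff i)
    (fun p => PySem.List.slice s (some p) (some (p + 3)) == pvATG)]
  rw [← pv_filter_snd (pvP s i) (pvOff i)
    (fun p => pvStopCodons.contains (PySem.List.slice s (some p) (some (p + 3))))]
  rw [List.nil_append, List.nil_append]

theorem pv_L_pairwise (s : List Char) (i : Int) : (pvL s i).Pairwise (fun a b => a.1 < b.1) :=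
  List.Pairwise.filter _ (pv_EP_pairwise s i)

theorem pv_M_pairwise (s : List Char) (i : Int) : (pvM s i).Pairwise (fun a b => a.1 < b.1) :=
  List.Pairwise.filter _ (pv_EP_pairwise s i)

theorem pv_min_start (s : List Char) (i : Int) (q0 : Int × Int) (Lt : List (Int × Int))
    (hL : pvL s i = q0 :: Lt) :
    PySem.List.min? ((pvL s i).map (fun q => q.1)) (fun x => x) = some q0.1 := by
  have hpw := pv_L_pairwise s i
  rw [hL] at hpw ⊢
  apply pv_min_eq
  · simp
  · intro x hx
    simp only [List.map_cons, List.mem_cons, List.mem_map] at hx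
    rcases hx with rfl | ⟨q, hq, rfl⟩
    · exact le_refl _
    · exact le_of_lt ((List.pairwise_cons.mp hpw).1 q hq)

theorem pv_mem_filtmap (l : List (Int × Int)) (p : Int × Int → Bool) (x : Int) :
    x ∈ (l.filter p).map (fun q => q.1) ↔ ∃ q ∈ l, p q = true ∧ q.1 = x := by
  constructor
  · rintro h
    obtain ⟨q, hq, rfl⟩ := List.mem_map.mp h
    rw [List.mem_filter] at hq
    exact ⟨q, hq.1, hq.2, rfl⟩
  · rintro ⟨q, hq, hp, rfl⟩
    exact List.mem_map.mpr ⟨q, List.mem_filter.mpr ⟨hq, hp⟩, rfl⟩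

theorem pv_contains_iff (z : List Char) :
    (pvStopCodons.contains z = true) ↔
      (z = ['T','A','A'] ∨ z = ['T','A','G'] ∨ z = ['T','G','A']) := by
  simp [pvStopCodons]

theorem pv_stop_mem (s : List Char) (i : Int) (hi : i = 0 ∨ i = 1 ∨ i = 2)
    (q0 : Int × Int) (Lt : List (Int × Int)) (hL : pvL s i = q0 :: Lt) :
    ∀ x, x ∈ pvStopPosA (pvFrame s i) (pvStartPosA (pvFrame s i)) ↔
      ∃ q ∈ pvM s i, q0.1 < q.1 ∧ x = q.1 := by
  have hstart := pv_start_eq s i hi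
  have hmin : PySem.List.min? (pvStartPosA (pvFrame s i)) (fun x => x) = some q0.1 := by
    rw [hstart]; exact pv_min_start s i q0 Lt hL
  have hcod : ∀ (sc : List Char), sc.length = 3 →
      ((PySem.List.enumerate (pvFrame s i) 0).filter
          (fun q => q.2 == sc && decide (q0.1 < q.1))).map (fun q => q.1)
        = ((pvEP s i).filter
            (fun q => PySem.List.slice s (some q.2) (some (q.2 + 3)) == sc
              && decide (q0.1 < q.1))).map (fun q => q.1) := by
    intro sc hlen
    refine pv_enum_filter s i hi (fun idx z => z == sc && decide (q0.1 < idx)) ?_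
    intro z hz idx
    have : (z == sc) = false := by
      apply beq_eq_false_iff_ne.mpr
      intro h; rw [h] at hz; omega
    simp [this]
  intro x
  unfold pvStopPosA
  simp only [pvStopCodons, List.foldl_cons, List.foldl_nil, hmin]
  rw [List.nil_append]
  rw [hcod ['T','A','A'] rfl, hcod ['T','A','G'] rfl, hcod ['T','G','A'] rfl]
  rw [List.mem_append, List.mem_append, pv_mem_filtmap, pv_mem_filtmap, pv_mem_filtmap]
  constructor
  · rintro ((⟨q, hq, hp, rfl⟩ | ⟨q, hq, hp, rfl⟩) | ⟨q, hq, hp, rfl⟩) <;>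
    · rw [Bool.and_eq_true, beq_iff_eq, decide_eq_true_eq] at hp
      refine ⟨q, ?_, hp.2, rfl⟩
      unfold pvM
      rw [List.mem_filter]
      refine ⟨hq, ?_⟩
      rw [pv_contains_iff]
      tauto
  · rintro ⟨q, hq, hlt, rfl⟩
    unfold pvM at hq
    rw [List.mem_filter] at hq
    obtain ⟨hqE, hqc⟩ := hq
    rw [pv_contains_iff] at hqc
    rcases hqc with hc | hc | hc
    · exact Or.inl (Or.inl ⟨q, hqE, by
        rw [Bool.and_eq_true, beq_iff_eq, decide_eq_true_eq]; exact ⟨hc, hlt⟩, rfl⟩)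
    · exact Or.inl (Or.inr ⟨q, hqE, by
        rw [Bool.and_eq_true, beq_iff_eq, decide_eq_true_eq]; exact ⟨hc, hlt⟩, rfl⟩)
    · exact Or.inr ⟨q, hqE, by
        rw [Bool.and_eq_true, beq_iff_eq, decide_eq_true_eq]; exact ⟨hc, hlt⟩, rfl⟩

theorem pv_chunk_len (s : List Char) (p : Int) (hp : 0 ≤ p) (h3 : p + 3 ≤ (s.length : Int)) :
    (PySem.List.slice s (some p) (some (p + 3))).length = 3 := by
  rw [PySem.List.slice_toNat s hp (by omega)]
  simp only [List.length_take, List.length_drop]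
  omega

theorem pv_codon_bound (s : List Char) (p : Int) (hp : 0 ≤ p)
    (h : (PySem.List.slice s (some p) (some (p + 3))).length = 3) :
    p + 3 ≤ (s.length : Int) := by
  rw [PySem.List.slice_toNat s hp (by omega)] at h
  simp only [List.length_take, List.length_drop] at h
  omega

theorem pv_chunks_flat (s : List Char) (i : Int) (hi0 : 0 ≤ i) :
    ∀ k : Nat, i + 3 * k ≤ (s.length : Int) →
      ((((List.range k).map (fun t : Nat => i + 3 * (t : Int))).map
          (fun j => PySem.List.slice s (some j) (some (j + 3)))).flatten).length = 3 * k := by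
  intro k
  induction k with
  | zero => simp
  | succ k ih =>
    intro hb
    rw [List.range_succ]
    simp only [List.map_append, List.map_cons, List.map_nil, List.flatten_append]
    rw [List.length_append]
    rw [ih (by push_cast at hb ⊢; omega)]
    have hck : (PySem.List.slice s (some (i + 3 * (k : Int)))
        (some (i + 3 * (k : Int) + 3))).length = 3 :=
      pv_chunk_len s (i + 3 * (k : Int)) (by omega) (by push_cast at hb ⊢; omega)
    simp only [List.flatten_cons, List.flatten_nil, List.append_nil, hck]
    omega

theorem pv_spos (s : List Char) (i : Int) (hi : i = 0 ∨ i = 1 ∨ i = 2) :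
    ∀ q ∈ pvL s i,
      PySem.List.len (PySem.Chars.join [] (PySem.List.slice (pvFrame s i) none (some q.1))) = q.2 := by
  intro q hq
  unfold pvL at hq
  rw [List.mem_filter] at hq
  obtain ⟨hqE, hqA⟩ := hq
  rw [pvEP, PySem.List.mem_enumerate_iff] at hqE
  obtain ⟨k, hk, rfl⟩ := hqE
  dsimp only at hqA ⊢
  set m := (if i < PySem.List.len s then ((PySem.List.len s - i + 3 - 1) / 3).toNat else 0) with hm
  have hkm : k < m := by
    have := hk
    rw [pv_P_eq s i] at this
    simpa using this
  have hval : (pvP s i)[k] = i + 3 * (k : Int) := by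
    rw [List.getElem_of_eq (pv_P_eq s i) hk, List.getElem_map, List.getElem_range]
  rw [hval] at hqA ⊢
  have hi0 : 0 ≤ i := by rcases hi with rfl | rfl | rfl <;> norm_num
  have hlen3 : (PySem.List.slice s (some (i + 3 * (k : Int)))
      (some (i + 3 * (k : Int) + 3))).length = 3 := by
    rw [beq_iff_eq] at hqA
    rw [hqA]; rfl
  have hbound : i + 3 * (k : Int) + 3 ≤ (s.length : Int) :=
    pv_codon_bound s (i + 3 * (k : Int)) (by omega) hlen3
  rw [pv_join_nil]
  have hchunks : pvChunksA s i = ((List.range m).map (fun t : Nat => i + 3 * (t : Int))).map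
      (fun j => PySem.List.slice s (some j) (some (j + 3))) := by
    unfold pvChunksA
    rw [show PySem.List.pyRange i (PySem.List.len s) 3 = pvP s i from rfl, pv_P_eq s i, ← hm]
  have htake : ∀ (kk : Nat), kk ≤ m →
      List.take kk (((List.range m).map (fun t : Nat => i + 3 * (t : Int))).map
        (fun j => PySem.List.slice s (some j) (some (j + 3))))
      = (((List.range kk).map (fun t : Nat => i + 3 * (t : Int))).map
        (fun j => PySem.List.slice s (some j) (some (j + 3)))) := by
    intro kk hkk
    rw [← List.map_take, ← List.map_take, List.take_range, min_eq_left hkk]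
  rcases hi with rfl | rfl | rfl
  · -- i = 0 : off = 0, frame = chunks
    rw [show pvFrame s 0 = pvChunksA s 0 from rfl]
    rw [show pvOff 0 = 0 from rfl]
    rw [PySem.List.slice_to _ (by omega)]
    rw [show ((0 : Int) + (k : Int)).toNat = k from by omega]
    rw [hchunks, htake k (by omega)]
    rw [PySem.List.len_eq]
    rw [pv_chunks_flat s 0 (by norm_num) k (by omega)]
    push_cast
    ring
  · -- i = 1 : off = 1, frame = prefix :: chunks
    rw [show pvFrame s 1 = PySem.List.slice s none (some 1) :: pvChunksA s 1 from rfl]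
    rw [show pvOff 1 = 1 from rfl]
    rw [PySem.List.slice_to _ (by omega)]
    rw [show ((1 : Int) + (k : Int)).toNat = k + 1 from by omega]
    rw [List.take_cons (by omega)]
    rw [show k + 1 - 1 = k from rfl]
    rw [hchunks, htake k (by omega)]
    rw [List.flatten_cons, PySem.List.len_eq, List.length_append]
    rw [pv_chunks_flat s 1 (by norm_num) k (by omega)]
    have hpre : (PySem.List.slice s none (some 1)).length = 1 := by
      rw [PySem.List.slice_to s (by norm_num)]
      simp only [List.length_take]
      push_cast at hbound
      omega
    rw [hpre]
    push_cast
    ring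
  · -- i = 2
    rw [show pvFrame s 2 = PySem.List.slice s none (some 2) :: pvChunksA s 2 from rfl]
    rw [show pvOff 2 = 1 from rfl]
    rw [PySem.List.slice_to _ (by omega)]
    rw [show ((1 : Int) + (k : Int)).toNat = k + 1 from by omega]
    rw [List.take_cons (by omega)]
    rw [show k + 1 - 1 = k from rfl]
    rw [hchunks, htake k (by omega)]
    rw [List.flatten_cons, PySem.List.len_eq, List.length_append]
    rw [pv_chunks_flat s 2 (by norm_num) k (by omega)]
    have hpre : (PySem.List.slice s none (some 2)).length = 2 := by
      rw [PySem.List.slice_to s (by norm_num)]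
      simp only [List.length_take]
      push_cast at hbound
      omega
    rw [hpre]
    push_cast
    ring

theorem pv_loop_eq (frame : List (List Char)) (c : Int) (M : List (Int × Int)) (stopA : List Int)
    (mn0 : Int)
    (hMc : ∀ q ∈ M, q.2 = 3 * q.1 + c) (hMs : M.Pairwise (fun a b => a.1 < b.1))
    (hstop : ∀ x, x ∈ stopA ↔ ∃ q ∈ M, mn0 < q.1 ∧ x = q.1) :
    ∀ (L' : List (Int × Int)) (j : Nat) (acc : List (Int × Int)),
      (∀ q ∈ L', q.2 = 3 * q.1 + c) → L'.Pairwise (fun a b => a.1 < b.1) →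
      (∀ q ∈ L', mn0 ≤ q.1) → j ≤ M.length →
      (∀ k (hk : k < M.length), k < j → ∀ q ∈ L', M[k].2 ≤ q.2) →
      (∀ q ∈ L',
        PySem.List.len (PySem.Chars.join [] (PySem.List.slice frame none (some q.1))) = q.2) →
      pvWhileA frame stopA (L'.map (fun q => q.1)) acc
        = pvPairB (M.map (fun q => q.2)) j acc (L'.map (fun q => q.2)) := by
  intro L'
  induction L' with
  | nil => intro j acc _ _ _ _ _ _; simp [pvWhileA, pvPairB]
  | cons q Lt ih =>
    intro j acc hLc hLs hmn hj hjle hspos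
    have hcons : ∀ q' ∈ Lt, q.1 < q'.1 := (List.pairwise_cons.mp hLs).1
    have hqmem : q ∈ q :: Lt := List.mem_cons_self
    have hstlen : (M.map (fun q => q.2)).length = M.length := by simp
    obtain ⟨ha1, ha2, ha3, ha4⟩ :=
      pv_adv_spec (M.map (fun q => q.2)) q.2 (M.map (fun q => q.2)).length j (by omega)
        (by omega)
    set adv := pvAdvanceB (M.map (fun q => q.2)) q.2 j with hadv
    have hall : ∀ k (hk : k < M.length), k < adv → M[k].2 ≤ q.2 := by
      intro k hk hka
      by_cases hkj : k < j
      · exact hjle k hk hkj q hqmem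
      · have := ha3 k (by omega) (by omega) hka
        simpa using this
    have hmin : PySem.List.min? (q.1 :: Lt.map (fun q => q.1)) (fun x => x) = some q.1 := by
      apply pv_min_eq
      · simp
      · intro x hx
        simp only [List.mem_cons, List.mem_map] at hx
        rcases hx with rfl | ⟨q', hq', rfl⟩
        · exact le_refl _
        · exact le_of_lt (hcons q' hq')
    rw [List.map_cons, List.map_cons]
    rw [pvWhileA, pvPairB]
    rw [← hadv]
    simp only [hmin, List.length_map]
    by_cases hjlt : adv < M.length
    · -- there is a stop after this start
      have hMadv : M[adv] ∈ M := List.getElem_mem _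
      have hq2lt : q.2 < M[adv].2 := by
        have := ha4 (by omega)
        simpa using this
      have hq1lt : q.1 < M[adv].1 := by
        have h1 := hMc M[adv] hMadv
        have h2 := hLc q hqmem
        omega
      have hinner : PySem.List.min? (stopA.filter (fun st => decide (q.1 < st))) (fun x => x)
          = some M[adv].1 := by
        apply pv_min_eq
        · rw [List.mem_filter]
          refine ⟨(hstop _).mpr ⟨M[adv], hMadv, lt_of_le_of_lt (hmn q hqmem) hq1lt, rfl⟩, by
            simp [hq1lt]⟩
        · intro x hx
          rw [List.mem_filter] at hx
          obtain ⟨hx1, hx2⟩ := hx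
          rw [decide_eq_true_eq] at hx2
          obtain ⟨q', hq', hmn', rfl⟩ := (hstop x).mp hx1
          obtain ⟨t, ht, rfl⟩ := List.mem_iff_getElem.mp hq'
          by_cases htadv : t < adv
          · exfalso
            have h1 := hall t ht htadv
            have h2 := hMc M[t] (List.getElem_mem _)
            have h3 := hLc q hqmem
            omega
          · rcases Nat.eq_or_lt_of_le (Nat.le_of_not_lt htadv) with h | h
            · subst h; exact le_refl _
            · exact le_of_lt (List.pairwise_iff_getElem.mp hMs adv t (by omega) ht h)
      rw [dif_pos hjlt]
      simp only [hinner, pv_remove_cons, Option.getD_some, List.getElem_map]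
      have hx : ((PySem.List.len (PySem.Chars.join [] (PySem.List.slice frame none (some q.1))) + 1 : Int),
          (M[adv].1 - q.1 + 1) * 3) = ((q.2 + 1 : Int), M[adv].2 - q.2 + 3) := by
        have h1 := hspos q hqmem
        have h2 := hMc M[adv] hMadv
        have h3 := hLc q hqmem
        rw [h1]
        have h5 : (M[adv].1 - q.1 + 1) * 3 = M[adv].2 - q.2 + 3 := by omega
        rw [h5]
      rw [hx]
      exact ih adv (acc ++ [((q.2 + 1 : Int), M[adv].2 - q.2 + 3)])
        (fun q' hq' => hLc q' (List.mem_cons_of_mem _ hq'))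
        (List.pairwise_cons.mp hLs).2
        (fun q' hq' => le_of_lt (lt_of_le_of_lt (hmn q hqmem) (hcons q' hq')))
        (by omega)
        (fun k hk hka q' hq' => by
          have h1 := hall k hk hka
          have h2 := hLc q hqmem
          have h3 := hLc q' (List.mem_cons_of_mem _ hq')
          have h4 := hcons q' hq'
          omega)
        (fun q' hq' => hspos q' (List.mem_cons_of_mem _ hq'))
    · -- no stop after this start: A breaks, B breaks
      have hempty : stopA.filter (fun st => decide (q.1 < st)) = [] := by
        rw [List.filter_eq_nil_iff]
        intro x hx
        obtain ⟨q', hq', hmn', rfl⟩ := (hstop x).mp hx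
        obtain ⟨t, ht, rfl⟩ := List.mem_iff_getElem.mp hq'
        have h1 := hall t ht (by omega)
        have h2 := hMc M[t] (List.getElem_mem _)
        have h3 := hLc q hqmem
        simp only [decide_eq_true_eq]
        omega
      rw [hempty]
      have hnone : PySem.List.min? ([] : List Int) (fun x => x) = none := rfl
      simp only [hnone]
      rw [dif_neg hjlt]

theorem pv_pos_eq (s : List Char) (i : Int) (hi : i = 0 ∨ i = 1 ∨ i = 2) :
    pvPosA s i = pvPosB s i := by
  unfold pvPosA pvPosB
  dsimp only
  rw [pv_scan_eq s i]
  dsimp only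
  rw [pv_start_eq s i hi]
  have hMc : ∀ q ∈ pvM s i, q.2 = 3 * q.1 + (i - 3 * pvOff i) :=
    fun q hq => pv_EP_affine s i q (List.mem_of_mem_filter hq)
  have hLc : ∀ q ∈ pvL s i, q.2 = 3 * q.1 + (i - 3 * pvOff i) :=
    fun q hq => pv_EP_affine s i q (List.mem_of_mem_filter hq)
  cases hL : pvL s i with
  | nil =>
    have hstopnil : pvStopPosA (pvFrame s i)
        (List.map (fun (q : Int × Int) => q.1) []) = [] := by
      simp [pvStopPosA, pvStopCodons, PySem.List.min?]
    rw [hstopnil]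
    simp [pvPairB]
  | cons q0 Lt =>
    rw [hL] at hLc
    have hLpw := pv_L_pairwise s i
    rw [hL] at hLpw
    have hspos := pv_spos s i hi
    rw [hL] at hspos
    have hstop := pv_stop_mem s i hi q0 Lt hL
    rw [pv_start_eq s i hi, hL] at hstop
    set SA := pvStopPosA (pvFrame s i) (List.map (fun (q : Int × Int) => q.1) (q0 :: Lt)) with hSA
    have hminL := pv_min_start s i q0 Lt hL
    rw [hL, List.map_cons] at hminL
    have hmn0 : ∀ q ∈ q0 :: Lt, q0.1 ≤ q.1 := by
      intro q hq
      rcases List.mem_cons.mp hq with rfl | hq'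
      · exact le_refl _
      · exact le_of_lt ((List.pairwise_cons.mp hLpw).1 q hq')
    have hloop := pv_loop_eq (pvFrame s i) (i - 3 * pvOff i) (pvM s i)
      SA q0.1
      hMc (pv_M_pairwise s i) hstop (q0 :: Lt) 0 [] hLc hLpw hmn0 (by omega)
      (fun k hk hkj => absurd hkj (Nat.not_lt_zero k)) hspos
    by_cases hz : SA = []
    · rw [hz] at hloop
      have hwhile : pvWhileA (pvFrame s i) []
          (List.map (fun (q : Int × Int) => q.1) (q0 :: Lt)) [] = [] := by
        rw [List.map_cons, pvWhileA]
        simp only [hminL]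
        rw [show List.filter (fun st => decide (q0.1 < st)) ([] : List Int) = [] from rfl]
        simp only [show PySem.List.min? ([] : List Int) (fun x => x) = none from rfl]
      rw [hwhile] at hloop
      rw [hz, ← hloop]
      simp
    · have hlenne : ((SA.length == 0) = false) :=
        beq_eq_false_iff_ne.mpr (fun h => hz (List.eq_nil_of_length_eq_zero h))
      simp only [hlenne, Bool.false_eq_true, if_false]
      rw [hloop]
      -- the loop emits at least one pair, so B's isEmpty branch is not taken
      obtain ⟨x0, hx0⟩ := List.exists_mem_of_ne_nil _ hz
      obtain ⟨q', hq', hmn', rfl⟩ := (hstop x0).mp hx0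
      have hfilt : q'.1 ∈ SA.filter (fun st => decide (q0.1 < st)) := by
        rw [List.mem_filter]
        exact ⟨hx0, by simp [hmn']⟩
      obtain ⟨e, hm2⟩ : ∃ e, PySem.List.min? (SA.filter (fun st => decide (q0.1 < st)))
          (fun x => x) = some e := by
        cases h : PySem.List.min? (SA.filter (fun st => decide (q0.1 < st))) (fun x => x) with
        | none =>
          rw [PySem.List.min?_eq_none_iff] at h
          rw [h] at hfilt
          simp at hfilt
        | some e => exact ⟨e, rfl⟩
      have hne : pvPairB ((pvM s i).map (fun q => q.2)) 0 []
          (List.map (fun (q : Int × Int) => q.2) (q0 :: Lt)) ≠ [] := by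
        rw [← hloop]
        rw [List.map_cons, pvWhileA]
        simp only [hminL, hm2, pv_remove_cons, Option.getD_some]
        intro hcontra
        have hlenle := pv_while_len (pvFrame s i) SA
          (Lt.map (fun q => q.1)).length (Lt.map (fun q => q.1)) (le_refl _)
          ([] ++ [((PySem.List.len (PySem.Chars.join []
            (PySem.List.slice (pvFrame s i) none (some q0.1))) + 1 : Int),
            (e - q0.1 + 1) * 3)])
        rw [hcontra] at hlenle
        simp at hlenle
      rw [if_neg (by simpa [List.isEmpty_iff] using hne)]

-- ===== VERDICT (by name: the statement is the Claim_ definition above) =====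
theorem orf_postion_finder_spec : Claim_equal_orf_postion_finder := by
  unfold Claim_equal_orf_postion_finder
  intro dna_seq _
  unfold Spec_orf_postion_finder orf_postion_finder orf_postion_finder_alt
  have h0 := pv_pos_eq dna_seq.toList 0 (by left; rfl)
  have h1 := pv_pos_eq dna_seq.toList 1 (by right; left; rfl)
  have h2 := pv_pos_eq dna_seq.toList 2 (by right; right; rfl)
  rw [show PySem.List.pyRange 0 3 1 = [0, 1, 2] from by decide]
  simp only [List.foldl_cons, List.foldl_nil]
  rw [h0, h1, h2]
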